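-- pv_equiv track=rewrite | github.com/redsphinx/uatu | src/project_data_handling.py | make_combos_1
-- ===== SOURCE A (Python) =====
-- from itertools import combinations
--
-- def make_combos_1(ids):
--     """ Given a list of strings, create combinations.
--         A combination is valid if the IDs match and if the image is not identical
--     """
--     def match(one, two):
--         one = one.split('/')[-1]
--         two = two.split('/')[-1]
--         return list(one)[0:4] == list(two)[0:4]
--
--     combos = list(combinations(ids, 2))
--
--     combo_list = [str(comb[0] + ',' + comb[1] + ',1\n') for comb in combos if
--                   (match(comb[0], comb[1]) and not comb[0] == comb[1])]
--
--     return combo_list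
-- ===== SOURCE B (Python) =====
-- def make_combos_1(ids):
--     """ Given a list of strings, create combinations.
--         A combination is valid if the IDs match and if the image is not identical
--     """
--     buckets = {}
--     for s in ids:
--         k = s.split('/')[-1][:4]
--         buckets.setdefault(k, []).append(s)
--     seen = {}
--     out = []
--     for s in ids:
--         k = s.split('/')[-1][:4]
--         p = seen.get(k, 0) + 1
--         seen[k] = p
--         for t in buckets[k][p:]:
--             if t != s:
--                 out.append(s + ',' + t + ',1\n')
--     return out
-- ===== Notes on version B (the rewrite author's own statement) =====
-- stated objective: faster
-- what changed: A tests every unordered pair and re-splits both strings per pair; B computes each key (first 4 chars of the last '/'-component) once, buckets elements by key, and pairs each element only with the later members of its own bucket, so non-matching pairs are never touched.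
import Mathlib
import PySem

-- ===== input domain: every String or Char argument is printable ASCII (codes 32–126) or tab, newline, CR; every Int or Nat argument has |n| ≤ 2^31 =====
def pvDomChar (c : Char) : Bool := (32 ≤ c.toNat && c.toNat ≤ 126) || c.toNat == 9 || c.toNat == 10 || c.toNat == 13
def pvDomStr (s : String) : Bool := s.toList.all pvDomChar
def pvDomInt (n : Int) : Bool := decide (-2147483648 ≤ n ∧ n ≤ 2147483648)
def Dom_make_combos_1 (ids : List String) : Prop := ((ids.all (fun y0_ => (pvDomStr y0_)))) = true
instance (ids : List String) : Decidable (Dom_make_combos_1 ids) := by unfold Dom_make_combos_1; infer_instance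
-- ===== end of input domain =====

-- B replaces A's O(n^2) all-pairs scan (with a per-pair key computation) by computing each key once
-- and bucketing elements by key, pairing each element only with the later members of its own bucket.

-- ===== PORT A =====
-- match(one, two): compare first 4 chars of the last '/'-component
def pvMatchA (one two : String) : Bool :=
  let one' := PySem.List.pyGetD (((PySem.Str.split? one "/").getD [])) (-1) ""
  let two' := PySem.List.pyGetD (((PySem.Str.split? two "/").getD [])) (-1) ""
  PySem.List.slice one'.toList (some 0) (some 4) == PySem.List.slice two'.toList (some 0) (some 4)

-- itertools.combinations(ids, 2), in order
def pvCombos2 : List String → List (String × String)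
  | [] => []
  | x :: xs => xs.map (fun y => (x, y)) ++ pvCombos2 xs

def make_combos_1 (ids : List String) : List String :=
  let combos := pvCombos2 ids
  (combos.filter (fun c => pvMatchA c.1 c.2 && !(c.1 == c.2))).map
    (fun c => c.1 ++ "," ++ c.2 ++ ",1\n")

-- ===== PORT B =====
-- s.split('/')[-1][:4]
def pvKeyB (s : String) : String :=
  PySem.Str.slice (PySem.List.pyGetD (((PySem.Str.split? s "/").getD [])) (-1) "") none (some 4)

-- buckets: key -> elements with that key, in order (setdefault(k, []).append(s))
def pvBuckets (ids : List String) : PySem.Dict String (List String) :=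
  ids.foldl (fun d s => d.modify (pvKeyB s) [] (· ++ [s])) PySem.Dict.empty

-- one iteration of B's main loop: advance this key's position, pair s with the later bucket members
def pvStep (buckets : PySem.Dict String (List String))
    (st : PySem.Dict String Int × List String) (s : String) :
    PySem.Dict String Int × List String :=
  let k := pvKeyB s
  let p := st.1.getD k 0 + 1
  let seen := st.1.insert k p
  let out := (PySem.List.slice (buckets.getD k []) (some p) none).foldl
      (fun acc t => if t != s then acc ++ [s ++ "," ++ t ++ ",1\n"] else acc) st.2
  (seen, out)

def make_combos_1_alt (ids : List String) : List String :=
  (ids.foldl (pvStep (pvBuckets ids)) (PySem.Dict.empty, [])).2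

-- ===== PRECONDITION & SPEC =====
def Spec_make_combos_1 (ids : List String) (out : List String) : Prop := out = make_combos_1_alt ids
instance (ids : List String) (out : List String) : Decidable (Spec_make_combos_1 ids out) := by unfold Spec_make_combos_1; infer_instance

-- ===== CLAIM (what is proved, stated in full; the proofs are below) =====
def Claim_equal_make_combos_1 : Prop := ∀ (ids : List String), Dom_make_combos_1 ids → Spec_make_combos_1 ids (make_combos_1 ids)

-- ===== LEMMAS AND PROOFS =====

-- B's key equals A's match key, as a list of chars
lemma keyB_toList (s : String) :
    (pvKeyB s).toList
      = PySem.List.slice (PySem.List.pyGetD (((PySem.Str.split? s "/").getD [])) (-1) "").toList (some 0) (some 4) := by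
  simp [pvKeyB]

-- String equality tested on the underlying char lists
lemma beq_toList (a b : String) : (a == b) = (a.toList == b.toList) := by
  by_cases h : a = b
  · simp [h]
  · simp [h]
    exact fun hh => h (String.toList_inj.mp hh)

-- Boolean equality test is symmetric
lemma beq_symm {A : Type} [BEq A] [LawfulBEq A] (a b : A) : (a == b) = (b == a) := by
  by_cases h : a = b
  · simp [h]
  · simp [h, Ne.symm h]

-- A's match test is B's key equality (swapped sides)
lemma matchA_eq_keyB (x t : String) :
    pvMatchA x t = (pvKeyB t == pvKeyB x) := by
  rw [beq_toList, keyB_toList, keyB_toList]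
  simp only [pvMatchA, PySem.List.slice_zero_start]
  exact beq_symm _ _

-- the bucket of key k holds exactly the elements whose key is k, in order
lemma buckets_aux (l : List String) : ∀ (d : PySem.Dict String (List String)) (k : String),
    (l.foldl (fun d s => d.modify (pvKeyB s) [] (· ++ [s])) d).getD k []
      = d.getD k [] ++ l.filter (fun s => pvKeyB s == k) := by
  induction l with
  | nil => intro d k; simp
  | cons x xs ih =>
    intro d k
    simp only [List.foldl_cons, List.filter_cons]
    rw [ih, PySem.Dict.getD_modify]
    by_cases h : k = pvKeyB x
    · simp [h]
    · simp [h, Ne.symm h]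

lemma buckets_getD (ids : List String) (k : String) :
    (pvBuckets ids).getD k [] = ids.filter (fun s => pvKeyB s == k) := by
  rw [pvBuckets, buckets_aux]
  simp

-- A's structural recursion
lemma make_combos_1_cons (x : String) (xs : List String) :
    make_combos_1 (x :: xs)
      = (xs.filter (fun y => pvMatchA x y && !(x == y))).map (fun y => x ++ "," ++ y ++ ",1\n")
        ++ make_combos_1 xs := by
  simp [make_combos_1, pvCombos2, List.filter_append, List.filter_map, List.map_map, Function.comp_def]

-- main loop invariant
lemma loop_spec (ids : List String) : ∀ (suf pre : List String)
    (seen : PySem.Dict String Int) (out : List String),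
    pre ++ suf = ids →
    (∀ k, seen.getD k 0 = ((pre.filter (fun s => pvKeyB s == k)).length : Int)) →
    (suf.foldl (pvStep (pvBuckets ids)) (seen, out)).2 = out ++ make_combos_1 suf := by
  intro suf
  induction suf with
  | nil => intro pre seen out _ _; simp [make_combos_1, pvCombos2]
  | cons x rest ih =>
    intro pre seen out hpre hinv
    simp only [List.foldl_cons]
    have hp : seen.getD (pvKeyB x) 0 + 1
        = ((pre.filter (fun s => pvKeyB s == pvKeyB x)).length : Int) + 1 := by rw [hinv]
    have hbucket : (pvBuckets ids).getD (pvKeyB x) []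
        = pre.filter (fun s => pvKeyB s == pvKeyB x) ++ x :: rest.filter (fun s => pvKeyB s == pvKeyB x) := by
      rw [buckets_getD, ← hpre]
      simp [List.filter_append]
    have hslice : PySem.List.slice ((pvBuckets ids).getD (pvKeyB x) [])
          (some (seen.getD (pvKeyB x) 0 + 1)) none
        = rest.filter (fun s => pvKeyB s == pvKeyB x) := by
      rw [hbucket, hp, PySem.List.slice_from _ (by positivity)]
      have : ((((pre.filter (fun s => pvKeyB s == pvKeyB x)).length : Int)) + 1).toNat
          = (pre.filter (fun s => pvKeyB s == pvKeyB x) ++ [x]).length := by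
        simp
      rw [this, show pre.filter (fun s => pvKeyB s == pvKeyB x) ++ x :: rest.filter (fun s => pvKeyB s == pvKeyB x)
            = (pre.filter (fun s => pvKeyB s == pvKeyB x) ++ [x]) ++ rest.filter (fun s => pvKeyB s == pvKeyB x) by simp,
          List.drop_left]
    have hstep : pvStep (pvBuckets ids) (seen, out) x
        = (seen.insert (pvKeyB x) (seen.getD (pvKeyB x) 0 + 1),
           out ++ ((rest.filter (fun s => pvKeyB s == pvKeyB x)).filter (fun t => t != x)).map
             (fun t => x ++ "," ++ t ++ ",1\n")) := by
      simp only [pvStep, hslice]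
      rw [PySem.List.foldl_append_if (fun t => t != x) (fun t => x ++ "," ++ t ++ ",1\n")]
    have hpred : ∀ t ∈ rest, (t != x && (pvKeyB t == pvKeyB x)) = (pvMatchA x t && !(x == t)) := by
      intro t _
      rw [matchA_eq_keyB]
      simp only [bne, beq_symm t x]
      exact Bool.and_comm _ _
    rw [hstep, ih (pre ++ [x]) _ _ (by simpa using hpre)]
    · rw [make_combos_1_cons, List.filter_filter, List.filter_congr hpred, List.append_assoc]
    · intro k
      rw [PySem.Dict.getD_insert]
      by_cases hk : k = pvKeyB x
      · subst hk
        rw [hinv]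
        simp [List.filter_append]
      · have : (pvKeyB x == k) = false := by
          simp
          exact fun hh => hk hh.symm
        simp [hk, hinv, List.filter_append, this]

-- ===== VERDICT (by name: the statement is the Claim_ definition above) =====
theorem make_combos_1_spec : Claim_equal_make_combos_1 := by
  intro ids _
  unfold Spec_make_combos_1 make_combos_1_alt
  have h := loop_spec ids ids [] PySem.Dict.empty [] rfl (fun k => by simp [PySem.Dict.getD_empty])
  simp [h]
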